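-- pv_equiv track=rewrite | github.com/raopriyam/Leetcode-CTCI-Python | findY1.py | findY
-- ===== SOURCE A (Python) =====
-- def findY(n):
--     left = [0,0]
--     right = [0,n-1]
--     mid = n//2
--     count = 0
--     for i in range(mid):
--         left[0] += 1
--         left[1] += 1
--         right[0] += 1
--         right[1] -= 1
--         count += 2
--     count += 1
--
--     count += (n-mid-1)
--
--     return count
-- ===== SOURCE B (Python) =====
-- def findY(n):
--     return n + n // 2
-- ===== Notes on version B (the rewrite author's own statement) =====
-- stated objective: faster
-- what changed: Replaced the O(n) counting loop by the closed form n + n//2; Pre_ restricts to nonnegative n (the natural domain of a count), since for negative n the loop never runs and A's value is an accident of the leftover arithmetic.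
-- outside the precondition, e.g. on findY(-5): A returns -2, B returns -8
import Mathlib
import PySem

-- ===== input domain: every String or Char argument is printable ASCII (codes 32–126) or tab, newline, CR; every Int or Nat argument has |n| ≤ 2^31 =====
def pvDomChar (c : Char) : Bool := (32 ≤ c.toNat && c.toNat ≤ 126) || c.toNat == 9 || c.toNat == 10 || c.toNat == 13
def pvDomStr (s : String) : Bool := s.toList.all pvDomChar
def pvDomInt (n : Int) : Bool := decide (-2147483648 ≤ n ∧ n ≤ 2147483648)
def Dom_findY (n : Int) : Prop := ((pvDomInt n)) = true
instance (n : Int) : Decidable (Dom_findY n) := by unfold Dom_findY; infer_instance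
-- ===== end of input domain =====

-- B replaces A's O(n) counting loop with the closed form n + n//2 (faster, asymptotic).


-- ===== PORT A =====
-- state: (left0, left1, right0, right1, count)
def findY (n : Int) : Int :=
  let mid := PySem.Int.floordiv n 2
  let st := (PySem.List.pyRange 0 mid 1).foldl
    (fun (st : Int × Int × Int × Int × Int) _ =>
      (st.1 + 1, st.2.1 + 1, st.2.2.1 + 1, st.2.2.2.1 - 1, st.2.2.2.2 + 2))
    (0, 0, 0, n - 1, 0)
  let count := st.2.2.2.2 + 1
  count + (n - mid - 1)

-- ===== PORT B =====
def findY_alt (n : Int) : Int := n + PySem.Int.floordiv n 2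

-- ===== PRECONDITION & SPEC =====
-- Pre_ restricts to nonnegative n, the natural domain of a count; for negative n the
-- loop in A never runs and its value there is an accident of the leftover arithmetic.
def Pre_findY (n : Int) : Prop := 0 ≤ n
instance (n : Int) : Decidable (Pre_findY n) := by unfold Pre_findY; infer_instance
def pvWitness_findY : Int := (7)
def Spec_findY (n : Int) (out : Int) : Prop := out = findY_alt n
instance (n : Int) (out : Int) : Decidable (Spec_findY n out) := by unfold Spec_findY; infer_instance

-- ===== CLAIM (what is proved, stated in full; the proofs are below) =====
def Claim_equal_findY : Prop := ∀ (n : Int), Dom_findY n → Pre_findY n → Spec_findY n (findY n)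

-- ===== LEMMAS AND PROOFS =====

-- the loop only adds 2 to the count component per iteration
theorem findY_loop_count (l : List Int) (init : Int × Int × Int × Int × Int) :
    (l.foldl
      (fun (st : Int × Int × Int × Int × Int) _ =>
        (st.1 + 1, st.2.1 + 1, st.2.2.1 + 1, st.2.2.2.1 - 1, st.2.2.2.2 + 2))
      init).2.2.2.2 = init.2.2.2.2 + 2 * l.length := by
  induction l generalizing init with
  | nil => simp
  | cons x xs ih =>
    simp only [List.foldl_cons, ih, List.length_cons]
    push_cast
    ring

-- ===== VERDICT (by name: the statement is the Claim_ definition above) =====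
theorem findY_spec : Claim_equal_findY := by
  intro n _ hn
  show findY n = findY_alt n
  unfold findY findY_alt
  simp only [findY_loop_count, PySem.List.length_pyRange_one]
  set m := PySem.Int.floordiv n 2 with hm
  have hm0 : 0 ≤ m := by
    have := Int.ediv_nonneg hn (by norm_num : (0:Int) ≤ 2)
    simpa [hm, PySem.Int.floordiv, Int.fdiv_eq_ediv] using this
  have h : ((m - 0).toNat : Int) = m := by omega
  rw [h]; ring
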